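-- pv_equiv track=rewrite | github.com/Andyporras/Recursion_cola | devolverIndices2()8-4-2021.py | devolverIndice_aux
-- ===== SOURCE A (Python) =====
-- def obtenerIndice(lista1,elemento,indice,resultado):
--     if(lista1==[]):
--         return resultado
--     elif(lista1[0]==elemento):
--         resultado=indice
--         return obtenerIndice(lista1[1:],elemento,indice+1,resultado+1)
--     else:
--         return obtenerIndice(lista1[1:],elemento,indice+1,resultado)
--
-- def devolverIndice_aux(lista,lista2,resultado):
--     if(lista2==[]):
--         return resultado
--     else:
--         indice=obtenerIndice(lista,lista2[0],-1,-1)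
--         if(indice!=-1):
--             resultado+=[indice]
--             return devolverIndice_aux(lista,lista2[1:],resultado)
--         else:
--             return devolverIndice_aux(lista,lista2[1:],resultado)
-- ===== SOURCE B (Python) =====
-- def devolverIndice_aux(lista, lista2, resultado):
--     # Build once a map value -> index of its LAST occurrence in lista,
--     # then look each element of lista2 up, skipping absent ones.
--     # Note: unlike A (which does resultado += [...]), B does not mutate
--     # resultado in place; the return value is identical.
--     last = {}
--     for i, x in enumerate(lista):
--         last[x] = i
--     return resultado + [last[e] for e in lista2 if e in last]
-- ===== Notes on version B (the rewrite author's own statement) =====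
-- stated objective: faster
-- what changed: Replaces the per-element recursive rescans of lista with a single pass that builds a dict of last-occurrence indices, then one lookup pass over lista2.
import Mathlib
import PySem

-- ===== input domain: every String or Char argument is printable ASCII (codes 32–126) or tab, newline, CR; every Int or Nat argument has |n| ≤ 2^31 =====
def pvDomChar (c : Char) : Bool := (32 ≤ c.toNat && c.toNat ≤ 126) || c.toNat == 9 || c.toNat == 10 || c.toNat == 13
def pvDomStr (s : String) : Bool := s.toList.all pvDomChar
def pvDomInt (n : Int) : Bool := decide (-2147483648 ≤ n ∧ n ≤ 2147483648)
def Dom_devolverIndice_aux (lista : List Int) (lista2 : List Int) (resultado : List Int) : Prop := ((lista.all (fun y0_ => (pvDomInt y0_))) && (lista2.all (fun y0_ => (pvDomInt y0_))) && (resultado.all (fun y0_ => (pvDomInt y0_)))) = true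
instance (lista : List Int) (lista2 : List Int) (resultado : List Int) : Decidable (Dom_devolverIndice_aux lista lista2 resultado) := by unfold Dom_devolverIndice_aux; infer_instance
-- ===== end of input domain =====

-- B builds a dict of last-occurrence indices in one pass instead of rescanning lista
-- recursively for every element of lista2; return values are equal (A mutates the
-- `resultado` argument in place via `+=`, B does not — the equivalence is about the return value).

-- ===== PORT A =====
def obtenerIndice (lista1 : List Int) (elemento : Int) (indice : Int) (resultado : Int) : Int :=
  match lista1 with
  | [] => resultado
  | x :: resto =>
    if x == elemento then
      let resultado := indice
      obtenerIndice resto elemento (indice + 1) (resultado + 1)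
    else
      obtenerIndice resto elemento (indice + 1) resultado

def devolverIndice_aux (lista : List Int) (lista2 : List Int) (resultado : List Int) : List Int :=
  match lista2 with
  | [] => resultado
  | e :: resto =>
    let indice := obtenerIndice lista e (-1) (-1)
    if indice != -1 then
      devolverIndice_aux lista resto (resultado ++ [indice])
    else
      devolverIndice_aux lista resto resultado

-- ===== PORT B =====
def devolverIndice_aux_alt (lista : List Int) (lista2 : List Int) (resultado : List Int) : List Int :=
  let last : PySem.Dict Int Int :=
    (PySem.List.enumerate lista 0).foldl (fun d p => d.insert p.2 p.1) PySem.Dict.empty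
  resultado ++ lista2.filterMap (fun e => last.get? e)

-- ===== PRECONDITION & SPEC =====
def Spec_devolverIndice_aux (lista : List Int) (lista2 : List Int) (resultado : List Int) (out : List Int) : Prop := out = devolverIndice_aux_alt lista lista2 resultado
instance (lista : List Int) (lista2 : List Int) (resultado : List Int) (out : List Int) : Decidable (Spec_devolverIndice_aux lista lista2 resultado out) := by unfold Spec_devolverIndice_aux; infer_instance

-- ===== CLAIM (what is proved, stated in full; the proofs are below) =====
def Claim_equal_devolverIndice_aux : Prop := ∀ (lista : List Int) (lista2 : List Int) (resultado : List Int), Dom_devolverIndice_aux lista lista2 resultado → Spec_devolverIndice_aux lista lista2 resultado (devolverIndice_aux lista lista2 resultado)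

-- ===== LEMMAS AND PROOFS =====

-- obtenerIndice is the "remember last-match index + 1" fold over enumerate
lemma obtenerIndice_eq_fold (l : List Int) (e : Int) :
    ∀ (s r : Int), obtenerIndice l e s r =
      (PySem.List.enumerate l s).foldl (fun r p => if p.2 == e then p.1 + 1 else r) r := by
  induction l with
  | nil => intro s r; simp [obtenerIndice, PySem.List.enumerate_nil]
  | cons x xs ih =>
    intro s r
    rw [PySem.List.enumerate_cons]
    by_cases h : x = e <;> simp [obtenerIndice, h, ih]

-- lookup in the dict built by the insert loop is the "last match" fold over enumerate
lemma dict_fold_get? (l : List Int) (e : Int) :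
    ∀ (s : Int) (d : PySem.Dict Int Int),
      ((PySem.List.enumerate l s).foldl (fun d p => d.insert p.2 p.1) d).get? e =
      (PySem.List.enumerate l s).foldl (fun o p => if p.2 == e then some p.1 else o) (d.get? e) := by
  induction l with
  | nil => intro s d; simp [PySem.List.enumerate_nil]
  | cons x xs ih =>
    intro s d
    rw [PySem.List.enumerate_cons]
    simp only [List.foldl_cons, ih]
    by_cases h : x = e
    · subst h; simp [PySem.Dict.get?_insert_self]
    · simp [PySem.Dict.get?_insert, Ne.symm h, h]

-- the two folds track each other: A's fold starts one index earlier but stores p.1 + 1,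
-- so its value equals the index B's fold stores (or stays -1 when B's option is none)
lemma fold_rel (l : List Int) (e : Int) :
    ∀ (s r : Int) (o : Option Int),
      (o = none ∧ r = -1) ∨ (∃ i, o = some i ∧ r = i ∧ 0 ≤ i) →
      0 ≤ s →
      (let r' := (PySem.List.enumerate l (s - 1)).foldl (fun r p => if p.2 == e then p.1 + 1 else r) r
       let o' := (PySem.List.enumerate l s).foldl (fun o p => if p.2 == e then some p.1 else o) o
       (o' = none ∧ r' = -1) ∨ (∃ i, o' = some i ∧ r' = i ∧ 0 ≤ i)) := by
  induction l with
  | nil => intro s r o hrel _; simpa [PySem.List.enumerate_nil] using hrel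
  | cons x xs ih =>
    intro s r o hrel hs
    rw [PySem.List.enumerate_cons, PySem.List.enumerate_cons]
    simp only [List.foldl_cons]
    have hstep : s - 1 + 1 = s + 1 - 1 := by ring
    by_cases h : x = e
    · rw [hstep]
      have := ih (s + 1) (s + 1 - 1) (some s) (Or.inr ⟨s, rfl, by ring, hs⟩) (by omega)
      simpa [h] using this
    · rw [hstep]
      have := ih (s + 1) r o hrel (by omega)
      simpa [h] using this

-- combined characterisation of A's helper call against B's dict lookup
lemma obtenerIndice_vs_get? (lista : List Int) (e : Int) :
    (((PySem.List.enumerate lista 0).foldl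
        (fun d p => d.insert p.2 p.1) (PySem.Dict.empty : PySem.Dict Int Int)).get? e = none ∧
       obtenerIndice lista e (-1) (-1) = -1) ∨
    (∃ i, ((PySem.List.enumerate lista 0).foldl
        (fun d p => d.insert p.2 p.1) (PySem.Dict.empty : PySem.Dict Int Int)).get? e = some i ∧
       obtenerIndice lista e (-1) (-1) = i ∧ 0 ≤ i) := by
  have h2 := dict_fold_get? lista e 0 PySem.Dict.empty
  have h3 := fold_rel lista e 0 (-1) none (Or.inl ⟨rfl, rfl⟩) le_rfl
  simp only [PySem.Dict.get?_empty] at h2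
  rw [obtenerIndice_eq_fold lista e (-1) (-1), h2]
  have h0 : (0 : Int) - 1 = -1 := by norm_num
  rw [h0] at h3
  simpa using h3

-- A's recursion over lista2 appends exactly the successful lookups
lemma main_loop (lista : List Int) :
    ∀ (lista2 resultado : List Int),
      devolverIndice_aux lista lista2 resultado = devolverIndice_aux_alt lista lista2 resultado := by
  intro lista2
  induction lista2 with
  | nil => intro resultado; simp [devolverIndice_aux, devolverIndice_aux_alt]
  | cons e resto ih =>
    intro resultado
    rcases obtenerIndice_vs_get? lista e with ⟨ho, hr⟩ | ⟨i, ho, hr, hi⟩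
    · have hne : (obtenerIndice lista e (-1) (-1) != -1) = false := by simp [hr]
      simp only [devolverIndice_aux, hne, Bool.false_eq_true, if_false]
      rw [ih resultado]
      simp [devolverIndice_aux_alt, ho]
    · have hne : (obtenerIndice lista e (-1) (-1) != -1) = true := by
        simp [hr]; omega
      simp only [devolverIndice_aux, hne, if_true]
      rw [hr, ih (resultado ++ [i])]
      simp [devolverIndice_aux_alt, ho]

-- ===== VERDICT (by name: the statement is the Claim_ definition above) =====
theorem devolverIndice_aux_spec : Claim_equal_devolverIndice_aux := by
  intro lista lista2 resultado _
  unfold Spec_devolverIndice_aux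
  exact main_loop lista lista2 resultado
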